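-- pv_equiv track=rewrite | github.com/TaintedPhoenix/pyfinal | app/filemanager.py | locatekey
-- ===== SOURCE A (Python) =====
-- def locatekey(key, data):
--   #takes a key and array of datalines
--   #returns the position of the dataline the key corresponds to in the array
--   output = -1
--   i = 0
--   for line in data:
--     line = line[0:len(line)-1]
--     dat = line.split(": ")
--     if dat[0] == key:
--       output = i
--     i += 1
--   return output
-- ===== SOURCE B (Python) =====
-- def locatekey(key, data):
--   #reverse scan: return the first matching index from the end (== last match), early exit
--   for i in range(len(data) - 1, -1, -1):
--     line = data[i]
--     line = line[0:len(line)-1]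
--     if line.split(": ")[0] == key:
--       return i
--   return -1
-- ===== Notes on version B (the rewrite author's own statement) =====
-- stated objective: alternative
-- what changed: Forward full sweep that overwrites a result variable is replaced by a reverse index scan with an immediate early return on the first (i.e. last) match.
import Mathlib
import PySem

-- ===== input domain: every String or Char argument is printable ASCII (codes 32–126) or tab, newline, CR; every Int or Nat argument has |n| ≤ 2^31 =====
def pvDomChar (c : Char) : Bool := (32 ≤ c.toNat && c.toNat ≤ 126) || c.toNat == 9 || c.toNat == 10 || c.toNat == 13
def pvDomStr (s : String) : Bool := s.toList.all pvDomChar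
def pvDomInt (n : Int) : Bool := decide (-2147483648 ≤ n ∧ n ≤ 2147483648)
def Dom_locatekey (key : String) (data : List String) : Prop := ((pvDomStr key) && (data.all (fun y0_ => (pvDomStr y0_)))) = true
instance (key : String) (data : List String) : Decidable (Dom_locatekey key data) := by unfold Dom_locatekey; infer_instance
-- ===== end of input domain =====

-- B differs by decomposition only: a reverse index scan with early return instead of a
-- forward sweep overwriting a result variable; same per-line test, same results.

-- shared per-line test: line[0:len(line)-1].split(": ")[0] == key
-- (str.split with a non-empty separator never returns an empty list, so dat[0] is total: headD "" is exact)
def lkCheck (key line : String) : Bool :=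
  let line' := PySem.Str.slice line (some 0) (some ((PySem.Str.len line : Int) - 1))
  (((PySem.Str.split? line' ": ").getD []).headD "") == key

-- ===== PORT A =====
-- forward loop: output := -1; for line in data: if match then output := i; i += 1
def lkGo (key : String) : List String → Int → Int → Int
  | [], output, _ => output
  | l :: rest, output, i => lkGo key rest (if lkCheck key l then i else output) (i + 1)

def locatekey (key : String) (data : List String) : Int :=
  lkGo key data (-1) 0

-- ===== PORT B =====
-- for i in range(len(data)-1, -1, -1): if match(data[i]) then return i; return -1
def lkFind (key : String) (data : List String) : List Int → Int
  | [] => -1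
  | i :: rest => if lkCheck key (PySem.List.pyGetD data i "") then i else lkFind key data rest

def locatekey_alt (key : String) (data : List String) : Int :=
  lkFind key data (PySem.List.pyRange ((data.length : Int) - 1) (-1) (-1))

-- ===== PRECONDITION & SPEC =====
def Spec_locatekey (key : String) (data : List String) (out : Int) : Prop := out = locatekey_alt key data
instance (key : String) (data : List String) (out : Int) : Decidable (Spec_locatekey key data out) := by unfold Spec_locatekey; infer_instance

-- ===== CLAIM (what is proved, stated in full; the proofs are below) =====
def Claim_equal_locatekey : Prop := ∀ (key : String) (data : List String), Dom_locatekey key data → Spec_locatekey key data (locatekey key data)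

-- ===== LEMMAS AND PROOFS =====

-- A's forward sweep over xs ++ [l]: the last element wins if it matches
theorem lkGo_append (key : String) (xs : List String) (l : String) :
    ∀ (out i : Int), lkGo key (xs ++ [l]) out i =
      if lkCheck key l then i + xs.length else lkGo key xs out i := by
  induction xs with
  | nil => intro out i; simp [lkGo]
  | cons x xs ih =>
      intro out i
      simp only [List.cons_append, lkGo, ih]
      split_ifs <;> (try rfl) <;> (simp only [List.length_cons]; push_cast; ring)

-- B's scan over indices strictly below xs.length ignores an appended element
theorem lkFind_append (key : String) (xs : List String) (l : String) :
    ∀ (idxs : List Int), (∀ i ∈ idxs, 0 ≤ i ∧ i < (xs.length : Int)) →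
      lkFind key (xs ++ [l]) idxs = lkFind key xs idxs := by
  intro idxs h
  induction idxs with
  | nil => rfl
  | cons i rest ih =>
      have hi := h i (by simp)
      have hget : PySem.List.pyGetD (xs ++ [l]) i "" = PySem.List.pyGetD xs i "" := by
        obtain ⟨k, hk⟩ : ∃ k : Nat, i = (k : Int) := ⟨i.toNat, (Int.toNat_of_nonneg hi.1).symm⟩
        subst hk
        have hk' : k < xs.length := by exact_mod_cast hi.2
        simp [PySem.List.pyGetD_natCast, List.getD_eq_getElem?_getD,
          List.getElem?_append_left hk']
      simp only [lkFind, hget, ih (fun j hj => h j (by simp [hj]))]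

theorem lkMain (key : String) (data : List String) :
    lkGo key data (-1) 0 = lkFind key data (PySem.List.pyRange ((data.length : Int) - 1) (-1) (-1)) := by
  induction data using List.reverseRecOn with
  | nil =>
      rw [show ((([]:List String)).length : Int) - 1 = -1 by simp,
        PySem.List.pyRange_neg_one_eq_nil (by norm_num : (-1:Int) ≤ -1)]
      rfl
  | append_singleton xs l ih =>
      have hlen : ((xs ++ [l]).length : Int) - 1 = (xs.length : Int) := by
        simp
      rw [hlen, PySem.List.pyRange_neg_one_cons (by omega : (-1:Int) < (xs.length : Int))]
      have hget : PySem.List.pyGetD (xs ++ [l]) (xs.length : Int) "" = l := by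
        simp [PySem.List.pyGetD_natCast, List.getD_eq_getElem?_getD]
      rw [lkGo_append]
      simp only [lkFind, hget]
      split_ifs with h
      · simp
      · rw [lkFind_append key xs l _ (fun i hi => by
          rw [PySem.List.mem_pyRange_neg_one] at hi; omega), ih]

-- ===== VERDICT (by name: the statement is the Claim_ definition above) =====
theorem locatekey_spec : Claim_equal_locatekey := by
  intro key data _
  unfold Spec_locatekey locatekey locatekey_alt
  exact lkMain key data
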